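-- pv_equiv track=rewrite | github.com/yumozi/breakout_assembly | img_to_mips.py | generate_low_res_img_code
-- ===== SOURCE A (Python) =====
-- def generate_low_res_img_code(vec):
--     """
--     Display a 32 x 16 image
--     """
--
--     code = "ANIMATION:\n"
--
--     code += "\taddi $sp, $sp, -4\n"
--     code += "\tsw $ra, 0($sp)\n"
--
--     x = 0
--     y = 0
--
--     for pixel in vec:
--
--         converted_x = str(x * 4)
--         converted_y = str(y * 4)
--
--         # load x to $a0
--         code += "\tli $a0, " + converted_x + "\n"
--
--         # load y to $a1
--         code += "\tli $a1, " + converted_y + "\n"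
--
--         # list color to hex color
--         r = hex(pixel[0]).lstrip("0x")
--         g = hex(pixel[1]).lstrip("0x")
--         b = hex(pixel[2]).lstrip("0x")
--         color = "0x" + r + g + b
--
--         # load color into $a2
--         code += "\tli $a2, " + color + "\n"
--
--         # call draw square
--         code += "\tjal DRAW_SQUARE\n"
--
--         x += 1
--
--         # Every 32 pixels
--         if x == 32:
--             # to next address
--             x = 0
--             y += 1
--
--     code += "\tlw $ra, 0($sp)\n"
--     code += "\taddi $sp, $sp, 4\n"
--     code += "\tjr $ra"
--     return code
-- ===== SOURCE B (Python) =====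
-- def generate_low_res_img_code(vec):
--     """
--     Display a 32 x 16 image
--     """
--     lines = ["ANIMATION:", "\taddi $sp, $sp, -4", "\tsw $ra, 0($sp)"]
--     lines += _pixel_lines(vec, 0)
--     lines += ["\tlw $ra, 0($sp)", "\taddi $sp, $sp, 4", "\tjr $ra"]
--     return "\n".join(lines)
--
--
-- def _pixel_lines(vec, y):
--     """Lines for one row of up to 32 pixels, then recurse on the remaining rows."""
--     if not vec:
--         return []
--     row, rest = vec[:32], vec[32:]
--     out = []
--     for x, pixel in enumerate(row):
--         r = hex(pixel[0]).lstrip("0x")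
--         g = hex(pixel[1]).lstrip("0x")
--         b = hex(pixel[2]).lstrip("0x")
--         out.append("\tli $a0, " + str(x * 4))
--         out.append("\tli $a1, " + str(y * 4))
--         out.append("\tli $a2, 0x" + r + g + b)
--         out.append("\tjal DRAW_SQUARE")
--     return out + _pixel_lines(rest, y + 1)
-- ===== Notes on version B (the rewrite author's own statement) =====
-- stated objective: alternative
-- what changed: B drops A's mutable x/y counters, wrap-around branch and growing string: it recurses over 32-pixel rows, builds a flat list of newline-free lines (header, per-pixel lines, footer) and emits the result as a single '\n'.join.
import Mathlib
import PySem

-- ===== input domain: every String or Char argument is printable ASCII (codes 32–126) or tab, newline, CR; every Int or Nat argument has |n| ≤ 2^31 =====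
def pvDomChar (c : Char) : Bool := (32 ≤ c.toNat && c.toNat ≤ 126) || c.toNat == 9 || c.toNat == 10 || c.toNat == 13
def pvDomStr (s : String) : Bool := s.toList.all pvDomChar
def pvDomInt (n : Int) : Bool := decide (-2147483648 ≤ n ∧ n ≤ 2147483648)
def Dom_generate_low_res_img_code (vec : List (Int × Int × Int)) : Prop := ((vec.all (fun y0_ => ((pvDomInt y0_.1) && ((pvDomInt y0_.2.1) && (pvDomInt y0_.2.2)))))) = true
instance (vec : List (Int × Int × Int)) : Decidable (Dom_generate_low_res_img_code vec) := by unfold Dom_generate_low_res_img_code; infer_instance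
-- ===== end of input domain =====

-- B replaces A's mutable x/y counters, wrap-around branch and growing string by a recursion
-- over 32-pixel rows that builds a flat list of newline-free lines and joins them with "\n"
-- (objective: alternative decomposition, same cost).

-- ===== PORT A =====
-- hand-ported primitive, exact for Python's hex(n): "0x"+lowercase hex digits, "-0x…" for n < 0
def pyHexChars (n : Int) : List Char :=
  if n < 0 then '-' :: '0' :: 'x' :: Nat.toDigits 16 n.natAbs
  else '0' :: 'x' :: Nat.toDigits 16 n.toNat

-- hand-ported, exact for Python's s.lstrip("0x"): drop leading chars that are '0' or 'x'
def lstrip0x (cs : List Char) : List Char := cs.dropWhile (fun c => c == '0' || c == 'x')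

-- color = "0x" + r + g + b   with r/g/b = hex(pixel[k]).lstrip("0x")  (identical in A and B)
def colorChars (pixel : Int × Int × Int) : List Char :=
  ['0', 'x'] ++ lstrip0x (pyHexChars pixel.1) ++ lstrip0x (pyHexChars pixel.2.1)
    ++ lstrip0x (pyHexChars pixel.2.2)

-- A's for-loop over vec with mutable state (code, x, y)
def genLoopA : List (Int × Int × Int) → List Char → Int → Int → List Char
  | [], code, _, _ => code
  | pixel :: rest, code, x, y =>
    let code := code ++ "\tli $a0, ".toList ++ (PySem.Int.toChars (x * 4)) ++ ['\n']
    let code := code ++ "\tli $a1, ".toList ++ (PySem.Int.toChars (y * 4)) ++ ['\n']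
    let code := code ++ "\tli $a2, ".toList ++ colorChars pixel ++ ['\n']
    let code := code ++ "\tjal DRAW_SQUARE\n".toList
    let x := x + 1
    if x == 32 then genLoopA rest code 0 (y + 1) else genLoopA rest code x y

def generate_low_res_img_code (vec : List (Int × Int × Int)) : String :=
  let code := "ANIMATION:\n".toList
  let code := code ++ "\taddi $sp, $sp, -4\n".toList
  let code := code ++ "\tsw $ra, 0($sp)\n".toList
  let code := genLoopA vec code 0 0
  let code := code ++ "\tlw $ra, 0($sp)\n".toList
  let code := code ++ "\taddi $sp, $sp, 4\n".toList
  let code := code ++ "\tjr $ra".toList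
  String.ofList code

-- ===== PORT B =====
-- the four newline-free lines B appends for one pixel at column x, row y
def pixelLines4 (x y : Int) (pixel : Int × Int × Int) : List (List Char) :=
  [ "\tli $a0, ".toList ++ PySem.Int.toChars (x * 4),
    "\tli $a1, ".toList ++ PySem.Int.toChars (y * 4),
    "\tli $a2, ".toList ++ colorChars pixel,
    "\tjal DRAW_SQUARE".toList ]

-- _pixel_lines: one row of up to 32 pixels (vec[:32]/vec[32:] with nonnegative bounds = take/drop),
-- the inner 'for x, pixel in enumerate(row)' appends pixelLines4
def pixelLinesB : List (Int × Int × Int) → Int → List (List Char)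
  | [], _ => []
  | p :: rest, y =>
    ((PySem.List.enumerate ((p :: rest).take 32) 0).flatMap fun xp => pixelLines4 xp.1 y xp.2)
      ++ pixelLinesB ((p :: rest).drop 32) (y + 1)
  termination_by v => v.length
  decreasing_by simp

def generate_low_res_img_code_alt (vec : List (Int × Int × Int)) : String :=
  let lines := ["ANIMATION:".toList, "\taddi $sp, $sp, -4".toList, "\tsw $ra, 0($sp)".toList]
  let lines := lines ++ pixelLinesB vec 0
  let lines := lines ++ ["\tlw $ra, 0($sp)".toList, "\taddi $sp, $sp, 4".toList, "\tjr $ra".toList]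
  String.ofList (PySem.Chars.join ['\n'] lines)

-- ===== PRECONDITION & SPEC =====
def Spec_generate_low_res_img_code (vec : List (Int × Int × Int)) (out : String) : Prop := out = generate_low_res_img_code_alt vec
instance (vec : List (Int × Int × Int)) (out : String) : Decidable (Spec_generate_low_res_img_code vec out) := by unfold Spec_generate_low_res_img_code; infer_instance

-- ===== CLAIM =====
def Claim_equal_generate_low_res_img_code : Prop := ∀ (vec : List (Int × Int × Int)), Dom_generate_low_res_img_code vec → Spec_generate_low_res_img_code vec (generate_low_res_img_code vec)

-- ===== LEMMAS AND PROOFS =====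

-- proof-side: A's per-pixel lines, structurally mirroring A's wrap-around recursion
def linesA : List (Int × Int × Int) → Int → Int → List (List Char)
  | [], _, _ => []
  | p :: rest, x, y =>
    pixelLines4 x y p ++ (if x + 1 == 32 then linesA rest 0 (y + 1) else linesA rest (x + 1) y)

-- proof-side: one row's lines with the enumerate counter started at x
def rowFrom (row : List (Int × Int × Int)) (x y : Int) : List (List Char) :=
  (PySem.List.enumerate row x).flatMap fun xp => pixelLines4 xp.1 y xp.2

theorem genLoopA_eq_linesA (vec : List (Int × Int × Int)) :
    ∀ (code : List Char) (x y : Int),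
      genLoopA vec code x y = code ++ ((linesA vec x y).map (· ++ ['\n'])).flatten := by
  induction vec with
  | nil => intro code x y; simp [genLoopA, linesA]
  | cons p rest ih =>
    intro code x y
    rw [genLoopA, linesA]
    by_cases hx : x + 1 = 32
    · have hb : (x + 1 == (32 : Int)) = true := by simpa using hx
      rw [hb]; simp only [if_true]
      rw [ih]
      simp [pixelLines4, List.append_assoc]
    · have hb : (x + 1 == (32 : Int)) = false := by simpa using hx
      rw [hb]; simp only [if_false, Bool.false_eq_true]
      rw [ih]
      simp [pixelLines4, List.append_assoc]

theorem linesA_eq_rowFrom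
    (N : Nat) (IH : ∀ w : List (Int × Int × Int), w.length < N → ∀ y, linesA w 0 y = pixelLinesB w y) :
    ∀ (vec : List (Int × Int × Int)), vec.length ≤ N → ∀ (x y : Int), 0 ≤ x → x < 32 →
      linesA vec x y
        = rowFrom (vec.take (32 - x).toNat) x y ++ pixelLinesB (vec.drop (32 - x).toNat) (y + 1) := by
  intro vec
  induction vec generalizing N with
  | nil => intro _ x y _ _
           rw [pixelLinesB.eq_def]
           simp [linesA, rowFrom, PySem.List.enumerate_nil]
  | cons p rest ih =>
    intro hlen x y h0 h1
    have hk : (32 - x).toNat = ((31 - x).toNat) + 1 := by omega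
    rw [linesA, hk]
    simp only [List.take_succ_cons, List.drop_succ_cons]
    rw [rowFrom, PySem.List.enumerate_cons]
    by_cases hx : x + 1 = 32
    · have hb : (x + 1 == (32 : Int)) = true := by simpa using hx
      rw [hb]; simp only [if_true]
      have h31 : (31 - x).toNat = 0 := by omega
      rw [h31]
      simp only [List.take_zero, List.drop_zero, PySem.List.enumerate_nil]
      rw [IH rest (by simpa using hlen) (y + 1)]
      simp
    · have hb : (x + 1 == (32 : Int)) = false := by simpa using hx
      rw [hb]; simp only [if_false, Bool.false_eq_true]
      have hrest : rest.length ≤ N := by simp at hlen; omega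
      rw [ih N IH hrest (x + 1) y (by omega) (by omega)]
      have h31 : (31 - x).toNat = (32 - (x + 1)).toNat := by omega
      rw [rowFrom, h31]
      simp [List.append_assoc]

theorem linesA_eq_pixelLinesB (vec : List (Int × Int × Int)) (y : Int) :
    linesA vec 0 y = pixelLinesB vec y := by
  induction hN : vec.length using Nat.strong_induction_on generalizing vec y with
  | _ N IH =>
    cases vec with
    | nil => rw [pixelLinesB.eq_def]; simp [linesA]
    | cons p rest =>
      have IH' : ∀ w : List (Int × Int × Int), w.length < N → ∀ y', linesA w 0 y' = pixelLinesB w y' := by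
        intro w hw y'
        exact IH w.length (hN ▸ hw) w y' rfl
      rw [linesA_eq_rowFrom N IH' (p :: rest) (le_of_eq hN) 0 y (by omega) (by omega)]
      simp only [show ((32 : Int) - 0).toNat = 32 by omega]
      rw [show pixelLinesB (p :: rest) y
            = ((PySem.List.enumerate ((p :: rest).take 32) 0).flatMap fun xp => pixelLines4 xp.1 y xp.2)
              ++ pixelLinesB ((p :: rest).drop 32) (y + 1) from by rw [pixelLinesB.eq_def]]
      rfl

-- "\n".join(ls ++ [last]) = concat of (line ++ "\n") over ls, then last (matches A's trailing-newline shape)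
theorem join_newline_eq (last : List Char) :
    ∀ (ls : List (List Char)),
      PySem.Chars.join ['\n'] (ls ++ [last]) = (ls.map (· ++ ['\n'])).flatten ++ last := by
  intro ls
  induction ls with
  | nil => simp [PySem.Chars.join_singleton]
  | cons a ls ih =>
    cases ls with
    | nil => simp [PySem.Chars.join_cons_cons, PySem.Chars.join_singleton]
    | cons b ls' =>
      rw [List.cons_append, List.cons_append, PySem.Chars.join_cons_cons, ← List.cons_append, ih]
      simp [List.append_assoc]

-- ===== VERDICT =====
theorem generate_low_res_img_code_spec : Claim_equal_generate_low_res_img_code := by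
  intro vec _
  unfold Spec_generate_low_res_img_code generate_low_res_img_code generate_low_res_img_code_alt
  have hjoin := join_newline_eq "\tjr $ra".toList
    (["ANIMATION:".toList, "\taddi $sp, $sp, -4".toList, "\tsw $ra, 0($sp)".toList]
      ++ pixelLinesB vec 0 ++ ["\tlw $ra, 0($sp)".toList, "\taddi $sp, $sp, 4".toList])
  simp only [List.append_assoc, List.cons_append, List.nil_append] at hjoin ⊢
  rw [hjoin]
  rw [genLoopA_eq_linesA vec _ 0 0, linesA_eq_pixelLinesB vec 0]
  simp [List.append_assoc]
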